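-- pv_equiv track=rewrite | github.com/SZabolotnii/MedGemma_StructCore | scripts/run_two_stage_structured_pipeline.py | _filter_stage1_markdown_for_stage2
-- ===== SOURCE A (Python) =====
-- from typing import Any, Dict, List, Optional, Tuple
--
-- def _filter_stage1_markdown_for_stage2(md: str, allowed_clusters: List[str]) -> str:
--     """
--     Keep only selected clusters from the Stage1 Markdown summary.
--     Stage2 must never see the raw EHR note; this is still derived-only content.
--     """
--     want = {c.strip().upper() for c in allowed_clusters if c.strip()}
--     out: List[str] = []
--     cur: str | None = None
--     for ln in (md or "").splitlines():
--         if ln.startswith("## "):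
--             cur = ln[3:].strip().upper()
--         if cur is not None and cur in want:
--             out.append(ln.rstrip())
--     # Ensure trailing newline.
--     return "\n".join(out).strip() + "\n"
-- ===== SOURCE B (Python) =====
-- def _filter_stage1_markdown_for_stage2(md, allowed_clusters):
--     """Two-stage rewrite: first partition the lines into header-keyed sections
--     (pre-header preamble discarded), then filter sections by the allowed set."""
--     sections = []  # (normalized header key, lines including the header line)
--     key = None
--     buf = []
--     for ln in (md or "").splitlines():
--         if ln.startswith("## "):
--             if key is not None:
--                 sections.append((key, buf))
--             key = ln[3:].strip().upper()
--             buf = [ln]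
--         elif key is not None:
--             buf.append(ln)
--     if key is not None:
--         sections.append((key, buf))
--     want = {c.strip().upper() for c in allowed_clusters if c.strip()}
--     out = [ln.rstrip() for k, lines in sections if k in want for ln in lines]
--     return "\n".join(out).strip() + "\n"
-- ===== Notes on version B (the rewrite author's own statement) =====
-- stated objective: alternative
-- what changed: A's single stateful scan that decides each line as it is read is replaced by a two-stage decomposition: first partition the lines into header-keyed sections (discarding the pre-header preamble), then filter whole sections by the allowed set and emit their rstripped lines.
import Mathlib
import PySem

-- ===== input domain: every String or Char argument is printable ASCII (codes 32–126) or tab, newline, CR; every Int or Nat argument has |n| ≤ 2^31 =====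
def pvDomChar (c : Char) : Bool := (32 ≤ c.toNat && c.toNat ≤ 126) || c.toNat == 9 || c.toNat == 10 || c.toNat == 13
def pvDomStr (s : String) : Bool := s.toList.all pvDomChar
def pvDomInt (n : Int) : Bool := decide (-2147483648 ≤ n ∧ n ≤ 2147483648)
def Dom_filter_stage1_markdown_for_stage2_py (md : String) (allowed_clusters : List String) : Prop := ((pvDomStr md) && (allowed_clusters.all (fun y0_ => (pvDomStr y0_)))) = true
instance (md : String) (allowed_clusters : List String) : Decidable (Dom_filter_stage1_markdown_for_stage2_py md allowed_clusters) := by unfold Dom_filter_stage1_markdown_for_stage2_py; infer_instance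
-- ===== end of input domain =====

-- B replaces A's stateful single scan by a two-stage decomposition (partition the lines
-- into header-keyed sections, then filter whole sections by the allowed set); objective: alternative.

-- normalized cluster key of a header line: ln[3:].strip().upper()
def pvKey (ln : String) : String :=
  PySem.Str.upper (PySem.Str.strip (PySem.Str.slice ln (some 3) none))

-- the allowed set: {c.strip().upper() for c in allowed_clusters if c.strip()}
def pvWant (allowed_clusters : List String) : PySem.Set String :=
  PySem.Set.ofList ((allowed_clusters.filter (fun c => PySem.Str.strip c != "")).map
    (fun c => PySem.Str.upper (PySem.Str.strip c)))

-- the body of A's loop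
def pvStepA (want : PySem.Set String) (st : List String × Option String) (ln : String) :
    List String × Option String :=
  let cur := if PySem.Str.startswith ln "## " then some (pvKey ln) else st.2
  let out := match cur with
    | some c => if PySem.Set.contains want c then st.1 ++ [PySem.Str.rstrip ln] else st.1
    | none => st.1
  (out, cur)

-- ===== PORT A =====
-- 'md or ""' is md when md ≠ "" and "" otherwise; splitlines "" = [], so splitlines md is exact.
def filter_stage1_markdown_for_stage2_py (md : String) (allowed_clusters : List String) : String :=
  let want := pvWant allowed_clusters
  let st := (PySem.Str.splitlines md).foldl (pvStepA want) ([], none)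
  PySem.Str.strip (PySem.Str.join "\n" st.1) ++ "\n"

-- ===== PORT B =====
-- 'if key is not None: sections.append((key, buf))'
def pvFlush (secs : List (String × List String)) (key? : Option String) (buf : List String) :
    List (String × List String) :=
  match key? with
  | some k => secs ++ [(k, buf)]
  | none => secs

-- the body of B's partition loop
def pvStepB (st : List (String × List String) × Option String × List String) (ln : String) :
    List (String × List String) × Option String × List String :=
  if PySem.Str.startswith ln "## " then
    (pvFlush st.1 st.2.1 st.2.2, some (pvKey ln), [ln])
  else match st.2.1 with
    | some _ => (st.1, st.2.1, st.2.2 ++ [ln])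
    | none => st

-- first stage: partition the lines into (normalized header, lines incl. header) sections
def pvSections (lines : List String) : List (String × List String) :=
  let st := lines.foldl pvStepB ([], none, [])
  pvFlush st.1 st.2.1 st.2.2

def filter_stage1_markdown_for_stage2_py_alt (md : String) (allowed_clusters : List String) : String :=
  let sections := pvSections (PySem.Str.splitlines md)
  let want := pvWant allowed_clusters
  let out := (sections.filter (fun s => PySem.Set.contains want s.1)).flatMap
    (fun s => s.2.map PySem.Str.rstrip)
  PySem.Str.strip (PySem.Str.join "\n" out) ++ "\n"

-- ===== PRECONDITION & SPEC =====
def Spec_filter_stage1_markdown_for_stage2_py (md : String) (allowed_clusters : List String) (out : String) : Prop := out = filter_stage1_markdown_for_stage2_py_alt md allowed_clusters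
instance (md : String) (allowed_clusters : List String) (out : String) : Decidable (Spec_filter_stage1_markdown_for_stage2_py md allowed_clusters out) := by unfold Spec_filter_stage1_markdown_for_stage2_py; infer_instance

-- ===== CLAIM (what is proved, stated in full; the proofs are below) =====
def Claim_equal_filter_stage1_markdown_for_stage2_py : Prop := ∀ (md : String) (allowed_clusters : List String), Dom_filter_stage1_markdown_for_stage2_py md allowed_clusters → Spec_filter_stage1_markdown_for_stage2_py md allowed_clusters (filter_stage1_markdown_for_stage2_py md allowed_clusters)

-- ===== LEMMAS AND PROOFS =====

-- what A's loop emits from a given current cluster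
def pvEmitA (want : PySem.Set String) : Option String → List String → List String
  | _, [] => []
  | cur, ln :: ls =>
    let cur' := if PySem.Str.startswith ln "## " then some (pvKey ln) else cur
    (match cur' with
      | some c => if PySem.Set.contains want c then [PySem.Str.rstrip ln] else []
      | none => []) ++ pvEmitA want cur' ls

-- A's cur after processing the lines
def pvCurAfter : Option String → List String → Option String
  | cur, [] => cur
  | cur, ln :: ls => pvCurAfter (if PySem.Str.startswith ln "## " then some (pvKey ln) else cur) ls

theorem pvFoldA (want : PySem.Set String) (lines : List String) :
    ∀ (out0 : List String) (cur : Option String),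
    lines.foldl (pvStepA want) (out0, cur)
    = (out0 ++ pvEmitA want cur lines, pvCurAfter cur lines) := by
  induction lines with
  | nil => intro out0 cur; simp [pvEmitA, pvCurAfter]
  | cons ln ls ih =>
    intro out0 cur
    simp only [List.foldl_cons, pvStepA, pvEmitA, pvCurAfter]
    cases h : (if PySem.Str.startswith ln "## " then some (pvKey ln) else cur) with
    | none => simp [ih]
    | some c => by_cases hc : c ∈ want <;> simp [ih, hc]

-- what B's first stage produces from a given (key?, buf) state
def pvSecsG : Option String → List String → List String → List (String × List String)
  | key?, buf, [] => pvFlush [] key? buf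
  | key?, buf, ln :: ls =>
    if PySem.Str.startswith ln "## " then
      pvFlush [] key? buf ++ pvSecsG (some (pvKey ln)) [ln] ls
    else
      match key? with
      | some _ => pvSecsG key? (buf ++ [ln]) ls
      | none => pvSecsG none buf ls

theorem pvFoldB (lines : List String) :
    ∀ (secs : List (String × List String)) (key? : Option String) (buf : List String),
    pvFlush (lines.foldl pvStepB (secs, key?, buf)).1
      (lines.foldl pvStepB (secs, key?, buf)).2.1
      (lines.foldl pvStepB (secs, key?, buf)).2.2
    = secs ++ pvSecsG key? buf lines := by
  induction lines with
  | nil => intro secs key? buf; cases key? <;> simp [pvSecsG, pvFlush]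
  | cons ln ls ih =>
    intro secs key? buf
    simp only [List.foldl_cons, pvSecsG]
    by_cases h : PySem.Str.startswith ln "## " = true
    · rw [if_pos h]
      have : pvStepB (secs, key?, buf) ln = (pvFlush secs key? buf, some (pvKey ln), [ln]) := by
        unfold pvStepB; rw [if_pos h]
      rw [this, ih]
      cases key? <;> simp [pvFlush]
    · rw [if_neg h]
      cases key? with
      | none =>
        have : pvStepB (secs, none, buf) ln = (secs, none, buf) := by
          unfold pvStepB; rw [if_neg h]
        rw [this, ih]
      | some k =>
        have : pvStepB (secs, some k, buf) ln = (secs, some k, buf ++ [ln]) := by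
          unfold pvStepB; rw [if_neg h]
        rw [this, ih]

-- filtering B's sections from state (key?, buf) emits A's lines plus buf's flush
theorem pvMain (want : PySem.Set String) (lines : List String) :
    ∀ (key? : Option String) (buf : List String),
    ((pvSecsG key? buf lines).filter (fun s => PySem.Set.contains want s.1)).flatMap
        (fun s => s.2.map PySem.Str.rstrip)
    = (match key? with
        | some k => if PySem.Set.contains want k then buf.map PySem.Str.rstrip else []
        | none => []) ++ pvEmitA want key? lines := by
  induction lines with
  | nil =>
    intro key? buf
    cases key? with
    | none => simp [pvSecsG, pvFlush, pvEmitA]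
    | some k =>
      by_cases hk : k ∈ want <;>
        simp [pvSecsG, pvFlush, pvEmitA, List.filter, hk]
  | cons ln ls ih =>
    intro key? buf
    simp only [pvSecsG, pvEmitA]
    by_cases h : PySem.Str.startswith ln "## " = true
    · rw [if_pos h, if_pos h]
      simp only [List.filter_append, List.flatMap_append]
      rw [ih]
      by_cases hk : pvKey ln ∈ want
      · cases key? with
        | none => simp [pvFlush, hk]
        | some k =>
          by_cases hk2 : k ∈ want <;>
            simp [pvFlush, List.filter, hk, hk2]
      · cases key? with
        | none => simp [pvFlush, hk]
        | some k =>
          by_cases hk2 : k ∈ want <;>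
            simp [pvFlush, List.filter, hk, hk2]
    · rw [if_neg h, if_neg h]
      cases key? with
      | none => rw [ih]; simp
      | some k =>
        rw [ih]
        by_cases hk : k ∈ want <;> simp [hk]

-- ===== VERDICT (by name: the statement is the Claim_ definition above) =====
theorem filter_stage1_markdown_for_stage2_py_spec : Claim_equal_filter_stage1_markdown_for_stage2_py := by
  intro md allowed_clusters _
  unfold Spec_filter_stage1_markdown_for_stage2_py
  unfold filter_stage1_markdown_for_stage2_py filter_stage1_markdown_for_stage2_py_alt pvSections
  simp only []
  rw [pvFoldA (pvWant allowed_clusters) (PySem.Str.splitlines md) [] none]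
  rw [pvFoldB (PySem.Str.splitlines md) [] none []]
  simp only [List.nil_append]
  rw [pvMain (pvWant allowed_clusters) (PySem.Str.splitlines md) none []]
  simp
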